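-- pv_equiv track=rewrite | github.com/seifalaa111/Intelligent_Systems_Project | PROJECT_SCRAPPED_DATA/extractors/base_extractor.py | _keyword_match_multi
-- ===== SOURCE A (Python) =====
-- def _keyword_match_multi(text: str, keyword_dict: dict, top_n: int = 3) -> list[str]:
--     """
--     Find multiple matching categories from a keyword dictionary.
--     Returns top N categories by score.
--     """
--     text_lower = text.lower()
--     scores = {}
--
--     for category, keywords in keyword_dict.items():
--         score = sum(1 for kw in keywords if kw.lower() in text_lower)
--         if score > 0:
--             scores[category] = score
--
--     if not scores:
--         return []
--
--     sorted_cats = sorted(scores, key=scores.get, reverse=True)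
--     return sorted_cats[:top_n]
-- ===== SOURCE B (Python) =====
-- def _keyword_match_multi(text: str, keyword_dict: dict, top_n: int = 3) -> list[str]:
--     """Bucket the categories by score instead of comparison-sorting them:
--     one pass builds score -> [categories] buckets, then the buckets are
--     emitted from the highest score down (building the result back-to-front)."""
--     t = text.lower()
--     buckets = {}  # score -> categories with that score, in insertion order
--     for category, keywords in keyword_dict.items():
--         score = 0
--         for kw in keywords:
--             if kw.lower() in t:
--                 score += 1
--         if score > 0:
--             buckets.setdefault(score, []).append(category)
--     if not buckets:
--         return []
--     out = []
--     for s in range(1, max(buckets) + 1):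
--         out = buckets.get(s, []) + out
--     return out[:top_n]
-- ===== Notes on version B (the rewrite author's own statement) =====
-- stated objective: alternative
-- what changed: Replaces the stable comparison sort of the score dict's keys by bucketing categories per score in one pass and emitting the buckets from the highest score down (result built back-to-front), removing the sort entirely.
import Mathlib
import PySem

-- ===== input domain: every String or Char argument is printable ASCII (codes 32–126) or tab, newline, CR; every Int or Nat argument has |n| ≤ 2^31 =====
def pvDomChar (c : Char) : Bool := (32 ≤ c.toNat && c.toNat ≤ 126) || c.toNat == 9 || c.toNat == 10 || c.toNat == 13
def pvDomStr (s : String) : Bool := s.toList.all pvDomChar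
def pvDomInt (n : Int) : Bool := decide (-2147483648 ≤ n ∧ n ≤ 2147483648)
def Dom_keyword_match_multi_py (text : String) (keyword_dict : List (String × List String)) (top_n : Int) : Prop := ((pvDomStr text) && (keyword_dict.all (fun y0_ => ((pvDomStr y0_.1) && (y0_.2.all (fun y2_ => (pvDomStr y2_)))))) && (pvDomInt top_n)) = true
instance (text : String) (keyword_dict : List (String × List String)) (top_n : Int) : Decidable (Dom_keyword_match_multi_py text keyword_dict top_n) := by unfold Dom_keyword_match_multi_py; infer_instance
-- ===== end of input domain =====

-- B replaces the stable comparison sort of the score dict's keys by per-score buckets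
-- emitted from the highest score down (alternative algorithm, same results).


-- ===== PORT A =====
-- the dict parameter arrives as its items list; '.items()' iteration goes through PySem.Dict.ofList
def keyword_match_multi_py (text : String) (keyword_dict : List (String × List String)) (top_n : Int) : List String :=
  let text_lower := PySem.Str.lower text
  let scores : PySem.Dict String Int :=
    (PySem.Dict.ofList keyword_dict).items.foldl
      (fun d p =>
        let score := ((p.2.filter (fun kw => PySem.Str.isIn (PySem.Str.lower kw) text_lower)).map
          (fun _ => (1 : Int))).sum
        if 0 < score then d.insert p.1 score else d)
      PySem.Dict.empty
  if scores.size = 0 then []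
  else
    let sorted_cats := PySem.List.sorted scores.keys (fun c => scores.getD c 0) true
    PySem.List.slice sorted_cats none (some top_n)

-- ===== PORT B =====
def keyword_match_multi_py_alt (text : String) (keyword_dict : List (String × List String)) (top_n : Int) : List String :=
  let t := PySem.Str.lower text
  let buckets : PySem.Dict Int (List String) :=
    (PySem.Dict.ofList keyword_dict).items.foldl
      (fun d p =>
        let score := p.2.foldl
          (fun s kw => if PySem.Str.isIn (PySem.Str.lower kw) t then s + 1 else s) (0 : Int)
        if 0 < score then d.modify score [] (· ++ [p.1]) else d)
      PySem.Dict.empty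
  if buckets.size = 0 then []
  else
    -- max(buckets) is total here (buckets nonempty); .getD 0 only totalizes the Option
    let best := (PySem.List.max? buckets.keys (fun s => s)).getD 0
    let out := (PySem.List.pyRange 1 (best + 1) 1).foldl (fun out s => buckets.getD s [] ++ out) []
    PySem.List.slice out none (some top_n)

-- ===== PRECONDITION & SPEC =====
def Spec_keyword_match_multi_py (text : String) (keyword_dict : List (String × List String)) (top_n : Int) (out : List String) : Prop := out = keyword_match_multi_py_alt text keyword_dict top_n
instance (text : String) (keyword_dict : List (String × List String)) (top_n : Int) (out : List String) : Decidable (Spec_keyword_match_multi_py text keyword_dict top_n out) := by unfold Spec_keyword_match_multi_py; infer_instance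

-- ===== CLAIM (what is proved, stated in full; the proofs are below) =====
def Claim_equal_keyword_match_multi_py : Prop := ∀ (text : String) (keyword_dict : List (String × List String)) (top_n : Int), Dom_keyword_match_multi_py text keyword_dict top_n → Spec_keyword_match_multi_py text keyword_dict top_n (keyword_match_multi_py text keyword_dict top_n)

-- ===== LEMMAS AND PROOFS =====

-- the one keyword-score function both ports compute
def pvScore (text : String) (p : String × List String) : Int :=
  ((p.2.countP (fun kw => PySem.Str.isIn (PySem.Str.lower kw) (PySem.Str.lower text))) : Int)

-- A's generator-sum is the countP-based score
theorem pvScoreA_eq (text : String) (p : String × List String) :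
    ((p.2.filter (fun kw => PySem.Str.isIn (PySem.Str.lower kw) (PySem.Str.lower text))).map
      (fun _ => (1 : Int))).sum = pvScore text p := by
  simp [pvScore, List.countP_eq_length_filter]

-- B's counting loop is the countP-based score
theorem pvScoreB_eq (text : String) (p : String × List String) :
    p.2.foldl (fun s kw => if PySem.Str.isIn (PySem.Str.lower kw) (PySem.Str.lower text) then s + 1 else s)
      (0 : Int) = pvScore text p := by
  simpa [pvScore] using
    PySem.List.foldl_count_if (fun kw => PySem.Str.isIn (PySem.Str.lower kw) (PySem.Str.lower text)) p.2 0

-- A's dict-building loop runs over exactly the positively scoring pairs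
theorem pvScoresA_eq (text : String) (l : List (String × List String)) (d : PySem.Dict String Int) :
    l.foldl (fun d p =>
        let score := ((p.2.filter (fun kw => PySem.Str.isIn (PySem.Str.lower kw) (PySem.Str.lower text))).map
          (fun _ => (1 : Int))).sum
        if 0 < score then d.insert p.1 score else d) d
    = (l.filter (fun p => decide (0 < pvScore text p))).foldl
        (fun d p => d.insert p.1 (pvScore text p)) d := by
  induction l generalizing d with
  | nil => rfl
  | cons p l ih =>
      rw [List.foldl_cons, ih, List.filter_cons]
      by_cases h : 0 < pvScore text p
      · have hd : decide (0 < pvScore text p) = true := by simp [h]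
        rw [if_pos hd, List.foldl_cons]
        congr 1
        simp only [pvScoreA_eq]
        rw [if_pos h]
      · have hd : ¬ (decide (0 < pvScore text p) = true) := by simp [h]
        rw [if_neg hd]
        congr 1
        simp only [pvScoreA_eq]
        rw [if_neg h]

-- B's bucket-building loop runs over exactly the positively scoring pairs
theorem pvBucketsB_eq (text : String) (l : List (String × List String)) (d : PySem.Dict Int (List String)) :
    l.foldl (fun d p =>
        let score := p.2.foldl
          (fun s kw => if PySem.Str.isIn (PySem.Str.lower kw) (PySem.Str.lower text) then s + 1 else s) (0 : Int)
        if 0 < score then d.modify score [] (· ++ [p.1]) else d) d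
    = (l.filter (fun p => decide (0 < pvScore text p))).foldl
        (fun d p => d.modify (pvScore text p) [] (· ++ [p.1])) d := by
  induction l generalizing d with
  | nil => rfl
  | cons p l ih =>
      rw [List.foldl_cons, ih, List.filter_cons]
      by_cases h : 0 < pvScore text p
      · have hd : decide (0 < pvScore text p) = true := by simp [h]
        rw [if_pos hd, List.foldl_cons]
        congr 1
        simp only [pvScoreB_eq]
        rw [if_pos h]
      · have hd : ¬ (decide (0 < pvScore text p) = true) := by simp [h]
        rw [if_neg hd]
        congr 1
        simp only [pvScoreB_eq]
        rw [if_neg h]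

-- insertBy walks past a block of elements it does not go before
theorem pvInsertBy_skip {α : Type} (before : α → α → Bool) (x : α) (l r : List α)
    (h : ∀ y ∈ l, before x y = false) :
    PySem.List.insertBy before x (l ++ r) = l ++ PySem.List.insertBy before x r := by
  induction l with
  | nil => simp
  | cons y l ih =>
      have hy : before x y = false := h y (List.mem_cons_self)
      simp [PySem.List.insertBy, hy, ih (fun z hz => h z (List.mem_cons_of_mem y hz))]

-- insertBy puts x in front of a list it goes before entirely
theorem pvInsertBy_front {α : Type} (before : α → α → Bool) (x : α) (r : List α)
    (h : ∀ y ∈ r, before x y = true) :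
    PySem.List.insertBy before x r = x :: r := by
  cases r with
  | nil => rfl
  | cons y r => simp [PySem.List.insertBy, h y (List.mem_cons_self)]

theorem pvFlatMap_congr {α β : Type} (l : List α) (f g : α → List β)
    (h : ∀ a ∈ l, f a = g a) : l.flatMap f = l.flatMap g := by
  induction l with
  | nil => rfl
  | cons a l ih =>
      simp [List.flatMap_cons, h a (List.mem_cons_self),
        ih (fun b hb => h b (List.mem_cons_of_mem a hb))]

-- inserting one element into a descending bucket concatenation appends it to its bucket
theorem pvInsertBy_buckets {α : Type} (key : α → Int) (x : α) (ss : List Int) (xs : List α)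
    (hss : ss.Pairwise (· > ·)) (hk : key x ∈ ss) :
    PySem.List.insertBy (fun a b => decide (key b < key a)) x
        (ss.flatMap (fun s => xs.filter (fun y => decide (key y = s))))
      = ss.flatMap (fun s => (xs ++ [x]).filter (fun y => decide (key y = s))) := by
  induction ss with
  | nil => cases hk
  | cons s ss ih =>
      obtain ⟨hhead, htail⟩ := List.pairwise_cons.mp hss
      simp only [List.flatMap_cons]
      by_cases hx : key x = s
      · rw [pvInsertBy_skip _ _ _ _ (fun y hy => by
          have := List.of_mem_filter hy
          simp only [decide_eq_true_eq] at this
          simp [this, hx])]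
        rw [pvInsertBy_front _ _ _ (fun z hz => by
          obtain ⟨s', hs', hzf⟩ := List.mem_flatMap.mp hz
          have := List.of_mem_filter hzf
          simp only [decide_eq_true_eq] at this
          simp [this, hx, hhead s' hs'])]
        have hcongr : ss.flatMap (fun s' => (xs ++ [x]).filter (fun y => decide (key y = s')))
            = ss.flatMap (fun s' => xs.filter (fun y => decide (key y = s'))) :=
          pvFlatMap_congr _ _ _ (fun s' hs' => by
            have hne : key x ≠ s' := by rw [hx]; exact ne_of_gt (hhead s' hs')
            simp [List.filter_append, hne])
        rw [hcongr, List.filter_append]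
        simp [hx]
      · have hk' : key x ∈ ss := by
          rcases List.mem_cons.mp hk with h' | h'
          · exact absurd h' hx
          · exact h'
        have hlt : key x < s := hhead _ hk'
        rw [pvInsertBy_skip _ _ _ _ (fun y hy => by
          have := List.of_mem_filter hy
          simp only [decide_eq_true_eq] at this
          simp [this]; omega)]
        rw [ih htail hk']
        simp [List.filter_append, hx]

-- a stable descending sort is the concatenation of the buckets in descending key order
theorem pvSorted_rev_eq_flatMap {α : Type} (key : α → Int) (ss : List Int) (xs : List α)
    (hss : ss.Pairwise (· > ·)) (hmem : ∀ x ∈ xs, key x ∈ ss) :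
    PySem.List.sorted xs key true = ss.flatMap (fun s => xs.filter (fun y => decide (key y = s))) := by
  induction xs using List.reverseRecOn with
  | nil => simp [PySem.List.sorted]
  | append_singleton xs x ih =>
      have hstep : PySem.List.sorted (xs ++ [x]) key true
          = PySem.List.insertBy (fun a b => decide (key b < key a)) x (PySem.List.sorted xs key true) := by
        simp [PySem.List.sorted, List.foldl_append]
      rw [hstep, ih (fun y hy => hmem y (List.mem_append_left _ hy))]
      exact pvInsertBy_buckets key x ss xs hss (hmem x (by simp))

-- folding bucket-prepends over an ascending range is flatMap over the descending range
theorem pvFoldl_prepend {α : Type} (f : Int → List α) (l : List Int) (acc : List α) :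
    l.foldl (fun out s => f s ++ out) acc = l.reverse.flatMap f ++ acc := by
  induction l generalizing acc with
  | nil => simp
  | cons s l ih => simp [List.foldl_cons, ih]

theorem keyword_match_multi_py_eq_alt (text : String) (keyword_dict : List (String × List String)) (top_n : Int) :
    keyword_match_multi_py text keyword_dict top_n = keyword_match_multi_py_alt text keyword_dict top_n := by
  unfold keyword_match_multi_py keyword_match_multi_py_alt
  simp only [pvScoresA_eq, pvBucketsB_eq]
  set F := (PySem.Dict.ofList keyword_dict).items.filter (fun p => decide (0 < pvScore text p)) with hF
  set scores := F.foldl (fun d p => d.insert p.1 (pvScore text p)) PySem.Dict.empty with hscores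
  set buckets := F.foldl (fun d p => d.modify (pvScore text p) [] (· ++ [p.1])) PySem.Dict.empty with hbuckets
  -- distinct categories
  have hnodk : ((PySem.Dict.ofList keyword_dict).items.map Prod.fst).Nodup := by
    have h := PySem.Dict.nodup_keys_ofList (κ := String) (ν := List String) keyword_dict
    simpa [PySem.Dict.keys] using h
  have hFnod : (F.map Prod.fst).Nodup := by
    have hsub : List.Sublist (F.map Prod.fst) ((PySem.Dict.ofList keyword_dict).items.map Prod.fst) :=
      List.filter_sublist.map Prod.fst
    exact hnodk.sublist hsub
  -- the score dict's contents
  have hsc_items : scores.items = F.map (fun p => (p.1, pvScore text p)) := by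
    rw [hscores, PySem.Dict.items_foldl_insert_fresh F Prod.fst (fun p => pvScore text p)
      PySem.Dict.empty (fun a _ => by simp) hFnod]
    rfl
  have hkeys : scores.keys = F.map Prod.fst := by
    simp only [PySem.Dict.keys, hsc_items, List.map_map]
    rfl
  have hkeysnod : scores.keys.Nodup := hkeys ▸ hFnod
  have hgetD : ∀ p ∈ F, scores.getD p.1 0 = pvScore text p := by
    intro p hp
    exact PySem.Dict.getD_of_mem_items scores
      (by rw [hsc_items]; exact List.mem_map_of_mem hp) hkeysnod 0
  -- the buckets' contents
  have hbk : buckets = (F.map (fun p => (pvScore text p, p.1))).foldl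
      (fun d q => d.modify q.1 [] (· ++ [q.2])) PySem.Dict.empty := by
    rw [hbuckets, List.foldl_map]
  have hbgetD : ∀ s : Int, buckets.getD s []
      = (F.filter (fun p => decide (pvScore text p = s))).map Prod.fst := by
    intro s
    rw [hbk, PySem.Dict.getD_foldl_modify_append]
    simp only [List.filter_map, List.map_map]
    have hfun : (fun p : String × List String => pvScore text p == s)
        = (fun p => decide (pvScore text p = s)) := by
      funext p
      by_cases h : pvScore text p = s <;> simp [h]
    simp [Function.comp_def, hfun]
  have hbkeys : buckets.keys = PySem.Set.ofList (F.map (fun p => pvScore text p)) := by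
    rw [hbuckets, PySem.Dict.keys_foldl_modify_key F (fun p => pvScore text p) []
      (fun _ p => (· ++ [p.1])) PySem.Dict.empty]
    simp [PySem.Set.ofList, PySem.Set.update]
  have hscore_pos : ∀ p ∈ F, 1 ≤ pvScore text p := by
    intro p hp
    have := List.of_mem_filter hp
    simp only [decide_eq_true_eq] at this
    omega
  by_cases hFe : F = []
  · -- nothing scores: both return []
    have h1 : scores.size = 0 := by rw [PySem.Dict.size, hsc_items, hFe]; simp
    have h2 : buckets.size = 0 := by
      rw [hbuckets, hFe]; simp [PySem.Dict.size, PySem.Dict.empty]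
    rw [if_pos h1, if_pos h2]
  · have h1 : ¬ scores.size = 0 := by
      rw [PySem.Dict.size, hsc_items]
      simpa using hFe
    have h2 : ¬ buckets.size = 0 := by
      intro h
      have : buckets.keys = [] := by
        have : buckets.items = [] := List.length_eq_zero_iff.mp h
        simp [PySem.Dict.keys, this]
      rw [hbkeys] at this
      rcases List.exists_mem_of_ne_nil _ hFe with ⟨p, hp⟩
      have : pvScore text p ∈ ([] : List Int) := by
        rw [← this, PySem.Set.mem_ofList]
        exact List.mem_map_of_mem hp
      simp at this
    rw [if_neg h1, if_neg h2]
    -- the maximal score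
    obtain ⟨m, hmx⟩ : ∃ m, PySem.List.max? buckets.keys (fun s => s) = some m := by
      cases h : PySem.List.max? buckets.keys (fun s => s) with
      | none =>
          exfalso
          apply h2
          have := (PySem.List.max?_eq_none_iff _ _).mp h
          simp [PySem.Dict.size, PySem.Dict.keys] at this ⊢
          simp [this]
      | some m => exact ⟨m, rfl⟩
    rw [hmx, Option.getD_some]
    have hmem_keys : ∀ s : Int, s ∈ buckets.keys ↔ s ∈ F.map (fun p => pvScore text p) := by
      intro s; rw [hbkeys, PySem.Set.mem_ofList]
    have hub : ∀ p ∈ F, pvScore text p ≤ m := by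
      intro p hp
      exact PySem.List.max?_isMax hmx _ ((hmem_keys _).mpr (List.mem_map_of_mem hp))
    have hm1 : 1 ≤ m := by
      rcases List.exists_mem_of_ne_nil _ hFe with ⟨p, hp⟩
      exact le_trans (hscore_pos p hp) (hub p hp)
    -- the descending score values
    set ss := (PySem.List.pyRange 1 (m + 1) 1).reverse with hss_def
    have hss : ss.Pairwise (· > ·) := by
      rw [hss_def, List.pairwise_reverse, PySem.List.pyRange_one]
      exact (List.pairwise_lt_range).map _ (by intro a b hab; simpa using hab)
    have hmem_ss : ∀ x : Int, x ∈ ss ↔ 1 ≤ x ∧ x < m + 1 := by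
      intro x
      rw [hss_def, List.mem_reverse, PySem.List.mem_pyRange_one]
    have hmemk : ∀ c ∈ scores.keys, scores.getD c 0 ∈ ss := by
      intro c hc
      rw [hkeys] at hc
      rcases List.mem_map.mp hc with ⟨p, hp, rfl⟩
      rw [hgetD p hp, hmem_ss]
      exact ⟨hscore_pos p hp, by have := hub p hp; omega⟩
    rw [pvSorted_rev_eq_flatMap (fun c => scores.getD c 0) ss scores.keys hss hmemk]
    rw [pvFoldl_prepend (fun s => buckets.getD s []) (PySem.List.pyRange 1 (m + 1) 1) []]
    rw [List.append_nil, ← hss_def]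
    congr 1
    apply pvFlatMap_congr
    intro s _
    rw [hbgetD s, hkeys, List.filter_map]
    apply congrArg (List.map Prod.fst)
    apply List.filter_congr
    intro p hp
    simp [hgetD p hp]

-- ===== VERDICT (by name: the statement is the Claim_ definition above) =====
theorem keyword_match_multi_py_spec : Claim_equal_keyword_match_multi_py := by
  intro text keyword_dict top_n _
  unfold Spec_keyword_match_multi_py
  exact keyword_match_multi_py_eq_alt text keyword_dict top_n
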